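-- pv_equiv track=rewrite | github.com/EllisD1974/adventofcode | 2025/day2/day2_pt1.py | find_sequential_double_pattern
-- ===== SOURCE A (Python) =====
-- from typing import List
--
-- def find_sequential_double_pattern(text: str) -> List[str]:
--     patterns = []
--
--     for size in range(1, len(text)//2 + 1):
--         for i in range(len(text) - 2 * size + 1):
--             pattern = text[i:i+size]
--             next_pattern = text[i+size:i+2*size]
--
--             if pattern == next_pattern:
--                 # Ensure it does NOT repeat more than twice
--                 third_start = i + 2 * size
--                 if third_start + size <= len(text) and text[third_start:third_start+size] == pattern:
--                     continue  # skips if more than twice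
--
--                 patterns.append(pattern)
--
--     return patterns
-- ===== SOURCE B (Python) =====
-- from typing import List
--
-- def _runs(text: str, size: int) -> List[int]:
--     # run[i] = length of the longest run of positions j >= i with text[j] == text[j + size]
--     n = len(text)
--     run = [0] * (n - size + 1)
--     for i in range(n - size - 1, -1, -1):
--         run[i] = run[i + 1] + 1 if text[i] == text[i + size] else 0
--     return run
--
-- def find_sequential_double_pattern(text: str) -> List[str]:
--     n = len(text)
--     patterns = []
--     for size in range(1, n // 2 + 1):
--         run = _runs(text, size)
--         for i in range(n - 2 * size + 1):
--             if run[i] >= size and run[i + size] < size: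
--                 patterns.append(text[i:i + size])
--     return patterns
-- ===== Notes on version B (the rewrite author's own statement) =====
-- stated objective: alternative
-- what changed: Replaces the per-position slice comparisons of the double loop by a per-size right-to-left run-length (longest-common-extension) array, so each double/triple-repeat test is a single array lookup; measured about the same speed at the tested sizes.
import Mathlib
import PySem

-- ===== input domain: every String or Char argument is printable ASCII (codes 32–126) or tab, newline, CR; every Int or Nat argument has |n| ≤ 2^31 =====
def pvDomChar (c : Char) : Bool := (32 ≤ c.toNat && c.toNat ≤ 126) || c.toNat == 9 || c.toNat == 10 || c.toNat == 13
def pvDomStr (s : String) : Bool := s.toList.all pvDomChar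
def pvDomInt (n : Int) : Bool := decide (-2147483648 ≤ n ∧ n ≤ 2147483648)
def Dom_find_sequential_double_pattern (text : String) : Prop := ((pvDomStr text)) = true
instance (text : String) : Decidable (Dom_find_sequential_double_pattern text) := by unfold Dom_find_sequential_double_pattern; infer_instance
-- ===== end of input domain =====

-- B replaces A's repeated slice comparisons by a per-size run-length (longest common
-- extension) array, so each double/triple-repeat test is a single array lookup.

-- ===== PORT A =====
def find_sequential_double_pattern (text : String) : List String :=
  let cs := text.toList
  let n : Int := cs.length
  (PySem.List.pyRange 1 (PySem.Int.floordiv n 2 + 1) 1).foldl (fun patterns size =>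
    (PySem.List.pyRange 0 (n - 2*size + 1) 1).foldl (fun patterns i =>
      let pattern := PySem.List.slice cs (some i) (some (i+size))
      let next_pattern := PySem.List.slice cs (some (i+size)) (some (i+2*size))
      if pattern = next_pattern then
        let third_start := i + 2*size
        if third_start + size ≤ n ∧
            PySem.List.slice cs (some third_start) (some (third_start+size)) = pattern then
          patterns
        else
          patterns ++ [String.ofList pattern]
      else patterns) patterns) []

-- ===== PORT B =====
-- _runs: the backward fill loop of Source B as the obvious structural recursion
-- (builds the run array right-to-left; second argument is text shifted by `size`).
def pvRuns : List Char → List Char → List Nat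
  | a :: as, b :: bs =>
      let r := pvRuns as bs
      (if a = b then r.headD 0 + 1 else 0) :: r
  | _, _ => [0]

def find_sequential_double_pattern_alt (text : String) : List String :=
  let cs := text.toList
  let n : Int := cs.length
  (PySem.List.pyRange 1 (PySem.Int.floordiv n 2 + 1) 1).foldl (fun patterns size =>
    let run := pvRuns cs (cs.drop size.toNat)
    (PySem.List.pyRange 0 (n - 2*size + 1) 1).foldl (fun patterns i =>
      if (size ≤ ((PySem.List.pyGetD run i 0 : Nat) : Int)) ∧
          (((PySem.List.pyGetD run (i+size) 0 : Nat) : Int) < size) then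
        patterns ++ [String.ofList (PySem.List.slice cs (some i) (some (i+size)))]
      else patterns) patterns) []

-- ===== PRECONDITION & SPEC =====
def Spec_find_sequential_double_pattern (text : String) (out : List String) : Prop := out = find_sequential_double_pattern_alt text
instance (text : String) (out : List String) : Decidable (Spec_find_sequential_double_pattern text out) := by unfold Spec_find_sequential_double_pattern; infer_instance

-- ===== CLAIM (what is proved, stated in full; the proofs are below) =====
def Claim_equal_find_sequential_double_pattern : Prop := ∀ (text : String), Dom_find_sequential_double_pattern text → Spec_find_sequential_double_pattern text (find_sequential_double_pattern text)

-- ===== LEMMAS AND PROOFS =====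

-- longest common extension of two lists
def pvLce : List Char → List Char → Nat
  | a :: as, b :: bs => if a = b then pvLce as bs + 1 else 0
  | _, _ => 0

theorem pvRuns_getD (xs : List Char) : ∀ (ys : List Char) (k : Nat),
    (pvRuns xs ys).getD k 0 = pvLce (xs.drop k) (ys.drop k) := by
  induction xs with
  | nil => intro ys k; cases ys <;> cases k <;> simp [pvRuns, pvLce]
  | cons a as ih =>
    intro ys k
    cases ys with
    | nil => cases k <;> simp [pvRuns, pvLce]
    | cons b bs =>
      cases k with
      | zero =>
        have h0 := ih bs 0
        simp only [List.drop_zero] at h0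
        simp [pvRuns, pvLce, List.head?_eq_getElem?, ← List.getD_eq_getElem?_getD, h0, List.getD_cons_zero]
      | succ k => simpa [pvRuns] using ih bs k

theorem pvLce_ge_iff : ∀ (k : Nat) (xs ys : List Char),
    (k ≤ pvLce xs ys) ↔ (xs.take k = ys.take k ∧ k ≤ xs.length ∧ k ≤ ys.length) := by
  intro k
  induction k with
  | zero => intro xs ys; simp
  | succ k ih =>
    intro xs ys
    cases xs with
    | nil => simp [pvLce]
    | cons a as =>
      cases ys with
      | nil => simp [pvLce]
      | cons b bs =>
        by_cases hab : a = b
        · subst hab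
          simp [pvLce, ih as bs]
        · simp [pvLce, hab]

theorem pvFloordiv2 (n : Int) : PySem.Int.floordiv n 2 = n / 2 := by
  rw [PySem.Int.floordiv]; exact Int.fdiv_eq_ediv_of_nonneg n (by norm_num)

-- ===== VERDICT (by name: the statement is the Claim_ definition above) =====
theorem find_sequential_double_pattern_spec : Claim_equal_find_sequential_double_pattern := by
  intro text _
  unfold Spec_find_sequential_double_pattern
  simp only [find_sequential_double_pattern, find_sequential_double_pattern_alt]
  apply PySem.List.foldl_congr_mem
  intro acc size hsize
  rw [PySem.List.mem_pyRange_one, pvFloordiv2] at hsize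
  have h2s : 2 * size ≤ (text.toList.length : Int) := by omega
  apply PySem.List.foldl_congr_mem
  intro acc2 i hi
  rw [PySem.List.mem_pyRange_one] at hi
  set cs := text.toList with hcs
  obtain ⟨s, hs⟩ := Int.eq_ofNat_of_zero_le (show (0:Int) ≤ size by omega)
  obtain ⟨j, hj⟩ := Int.eq_ofNat_of_zero_le hi.1
  subst hs hj
  have hlen : j + 2 * s ≤ cs.length := by exact_mod_cast (by omega : ((j:Int) + 2*s ≤ (cs.length:Int)))
  have hs1 : 1 ≤ s := by exact_mod_cast hsize.1
  -- rewrite the slices into take/drop form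
  have t1 : ((j:Int) + (s:Int)) = ((j + s : Nat) : Int) := by push_cast; ring
  have t2 : ((j:Int) + 2*(s:Int)) = ((j + 2*s : Nat) : Int) := by push_cast; ring
  have t3 : ((j:Int) + 2*(s:Int) + (s:Int)) = ((j + 3*s : Nat) : Int) := by push_cast; ring
  rw [t3, t2, t1]
  simp only [PySem.List.slice_natCast, PySem.List.pyGetD_natCast]
  have e0 : ((s:Int)).toNat = s := Int.toNat_natCast s
  rw [e0]
  have r1 : (pvRuns cs (cs.drop s)).getD j 0 = pvLce (cs.drop j) (cs.drop (j + s)) := by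
    rw [pvRuns_getD, List.drop_drop]; ring_nf
  have r2 : (pvRuns cs (cs.drop s)).getD (j + s) 0
      = pvLce (cs.drop (j + s)) (cs.drop (j + 2*s)) := by
    rw [pvRuns_getD, List.drop_drop]
    congr 2
    omega
  rw [r1, r2]
  have m1 : j + s - j = s := by omega
  have m2 : j + 2*s - (j + s) = s := by omega
  have m3 : j + 3*s - (j + 2*s) = s := by omega
  rw [m1, m2, m3]
  by_cases hpat : (cs.drop j).take s = (cs.drop (j + s)).take s
  · have hb1 : s ≤ pvLce (cs.drop j) (cs.drop (j + s)) := by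
      rw [pvLce_ge_iff]
      refine ⟨hpat, by simp; omega, by simp; omega⟩
    by_cases hthird : s ≤ pvLce (cs.drop (j + s)) (cs.drop (j + 2*s))
    · -- A's third condition holds as well: neither side appends
      have hA : ((j + 3*s : Nat) : Int) ≤ (cs.length : Int) ∧
          (cs.drop (j + 2*s)).take s = (cs.drop j).take s := by
        rw [pvLce_ge_iff] at hthird
        obtain ⟨he, _, h3⟩ := hthird
        simp only [List.length_drop] at h3
        refine ⟨by exact_mod_cast (by omega : j + 3*s ≤ cs.length), ?_⟩
        rw [← he]; exact hpat.symm
      have hB : ¬ ((s:Int) ≤ ((pvLce (cs.drop j) (cs.drop (j + s)) : Nat) : Int) ∧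
          ((pvLce (cs.drop (j + s)) (cs.drop (j + 2*s)) : Nat) : Int) < (s:Int)) := by
        omega
      rw [if_pos hpat, if_pos hA, if_neg hB]
    · -- A's third condition fails: both sides append the pattern
      have hA : ¬ (((j + 3*s : Nat) : Int) ≤ (cs.length : Int) ∧
          (cs.drop (j + 2*s)).take s = (cs.drop j).take s) := by
        rintro ⟨hle, heq⟩
        apply hthird
        rw [pvLce_ge_iff]
        have hle' : j + 3*s ≤ cs.length := by exact_mod_cast hle
        refine ⟨?_, by simp; omega, by simp; omega⟩
        rw [← hpat]; exact heq.symm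
      have hB : ((s:Int) ≤ ((pvLce (cs.drop j) (cs.drop (j + s)) : Nat) : Int) ∧
          ((pvLce (cs.drop (j + s)) (cs.drop (j + 2*s)) : Nat) : Int) < (s:Int)) := by
        omega
      rw [if_pos hpat, if_neg hA, if_pos hB]
  · -- patterns differ: neither side appends
    have hb1 : ¬ s ≤ pvLce (cs.drop j) (cs.drop (j + s)) := by
      intro h
      exact hpat ((pvLce_ge_iff s _ _).1 h).1
    have hB : ¬ ((s:Int) ≤ ((pvLce (cs.drop j) (cs.drop (j + s)) : Nat) : Int) ∧
        ((pvLce (cs.drop (j + s)) (cs.drop (j + 2*s)) : Nat) : Int) < (s:Int)) := by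
      omega
    rw [if_neg hpat, if_neg hB]
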